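-- pv_equiv track=rewrite | github.com/Naman18055/CF-Solutions | Round 575/D.py | f
-- ===== SOURCE A (Python) =====
-- def f(l):
-- 	count1,count2,count3=0,0,0
-- 	start="R"
-- 	prev="B"
-- 	for i in range(len(l)):
-- 		if l[i]!=start:
-- 			count1+=1
-- 		prev=start
-- 		if start=="R":
-- 			start="G"
-- 		elif start=="G":
-- 			start="B"
-- 		else:
-- 			start="R"
-- 	#print (count1)
-- 	start="G"
-- 	prev="R"
-- 	for i in range(len(l)):
-- 		if l[i]!=start:
-- 			count2+=1
-- 		prev=start
-- 		if start=="R":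
-- 			start="G"
-- 		elif start=="G":
-- 			start="B"
-- 		else:
-- 			start="R"
-- 	#print (count2)
-- 	start="B"
-- 	prev="G"
-- 	for i in range(len(l)):
-- 		if l[i]!=start:
-- 			count3+=1
-- 		prev=start
-- 		if start=="R":
-- 			start="G"
-- 		elif start=="G":
-- 			start="B"
-- 		else:
-- 			start="R"
-- 	#print (count3)
-- 	#print (min(count1,count2,count3))
-- 	return min(count1,count2,count3)
-- ===== SOURCE B (Python) =====
-- def f(l):
--     # One pass: count, for each residue r = i % 3, how many positions hold each of R/G/B;
--     # then each cyclic phase's match total is read off the table.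
--     cnt = [[0, 0, 0] for _ in range(3)]
--     for i, ch in enumerate(l):
--         if ch == "R":
--             cnt[i % 3][0] += 1
--         elif ch == "G":
--             cnt[i % 3][1] += 1
--         elif ch == "B":
--             cnt[i % 3][2] += 1
--     best = max(cnt[0][p % 3] + cnt[1][(p + 1) % 3] + cnt[2][(p + 2) % 3]
--                for p in range(3))
--     return len(l) - best
-- ===== Notes on version B (the rewrite author's own statement) =====
-- stated objective: faster
-- what changed: Replaces A's three full passes (one per cyclic phase, each simulating the rotating expected colour) by a single pass building a 3x3 table counting each colour per index residue mod 3, from which the three phase match totals are read off and the answer is len(l) minus the best match total (constant-factor: one traversal instead of three).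
import Mathlib
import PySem

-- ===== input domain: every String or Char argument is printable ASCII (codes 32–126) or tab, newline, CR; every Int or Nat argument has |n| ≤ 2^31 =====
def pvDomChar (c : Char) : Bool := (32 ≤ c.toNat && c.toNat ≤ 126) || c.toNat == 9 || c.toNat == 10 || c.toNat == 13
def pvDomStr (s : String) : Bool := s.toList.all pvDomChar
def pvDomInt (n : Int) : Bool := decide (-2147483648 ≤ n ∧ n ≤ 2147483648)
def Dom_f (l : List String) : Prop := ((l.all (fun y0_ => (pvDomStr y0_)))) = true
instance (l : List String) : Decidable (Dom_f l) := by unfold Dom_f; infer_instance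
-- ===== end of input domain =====

-- B replaces A's three whole-list passes by one pass building a 3×3 residue/colour table
-- from which the three phase match-counts are read off (objective: alternative decomposition).

-- ===== PORT A =====
-- one iteration of each of A's three identical loops: state is (count, start, prev)
def fStep (st : Int × String × String) (x : String) : Int × String × String :=
  match st with
  | (count, start, _prev) =>
    let count := if x ≠ start then count + 1 else count
    let prev := start
    let start := if start = "R" then "G" else if start = "G" then "B" else "R"
    (count, start, prev)

def f (l : List String) : Int :=
  let r1 := l.foldl fStep (0, "R", "B")
  let r2 := l.foldl fStep (0, "G", "R")
  let r3 := l.foldl fStep (0, "B", "G")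
  min (min r1.1 r2.1) r3.1

-- ===== PORT B =====
-- cnt[r][j] += 1 on a row (triple) of the table
def bump (t : Int × Int × Int) (j : Nat) : Int × Int × Int :=
  match t with
  | (a, b, c) => if j = 0 then (a + 1, b, c) else if j = 1 then (a, b + 1, c) else (a, b, c + 1)

-- cnt[r][j] += 1 on the whole 3×3 table
def upd3 (cnt : (Int × Int × Int) × (Int × Int × Int) × (Int × Int × Int)) (r j : Nat) :
    (Int × Int × Int) × (Int × Int × Int) × (Int × Int × Int) :=
  match cnt with
  | (c0, c1, c2) =>
    if r = 0 then (bump c0 j, c1, c2)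
    else if r = 1 then (c0, bump c1 j, c2)
    else (c0, c1, bump c2 j)

-- the `for i, ch in enumerate(l)` loop, index carried explicitly
def goB (i : Nat) (cnt : (Int × Int × Int) × (Int × Int × Int) × (Int × Int × Int)) :
    List String → (Int × Int × Int) × (Int × Int × Int) × (Int × Int × Int)
  | [] => cnt
  | x :: xs =>
      let cnt := if x = "R" then upd3 cnt (i % 3) 0
                 else if x = "G" then upd3 cnt (i % 3) 1
                 else if x = "B" then upd3 cnt (i % 3) 2
                 else cnt
      goB (i + 1) cnt xs

-- cnt-row lookup (cnt[r][k] for k already reduced mod 3 at the call site, as in Source B)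
def get3 (t : Int × Int × Int) (k : Nat) : Int :=
  if k = 0 then t.1 else if k = 1 then t.2.1 else t.2.2

def f_alt (l : List String) : Int :=
  let cnt := goB 0 ((0, 0, 0), (0, 0, 0), (0, 0, 0)) l
  let m := fun (p : Nat) =>
    get3 cnt.1 (p % 3) + get3 cnt.2.1 ((p + 1) % 3) + get3 cnt.2.2 ((p + 2) % 3)
  (l.length : Int) - max (max (m 0) (m 1)) (m 2)

-- ===== PRECONDITION & SPEC =====
def Spec_f (l : List String) (out : Int) : Prop := out = f_alt l
instance (l : List String) (out : Int) : Decidable (Spec_f l out) := by unfold Spec_f; infer_instance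

-- ===== CLAIM (what is proved, stated in full; the proofs are below) =====
def Claim_equal_f : Prop := ∀ (l : List String), Dom_f l → Spec_f l (f l)

-- ===== LEMMAS AND PROOFS =====
-- the expected colour at a position of residue k
def rgb (k : Nat) : String := if k % 3 = 0 then "R" else if k % 3 = 1 then "G" else "B"

-- mismatches of l against the cyclic colouring whose phase at the head is p
def misA : Nat → List String → Int
  | _, [] => 0
  | p, x :: xs => (if x ≠ rgb p then 1 else 0) + misA (p + 1) xs

-- matches of l against the same colouring
def matA : Nat → List String → Int
  | _, [] => 0
  | p, x :: xs => (if x = rgb p then 1 else 0) + matA (p + 1) xs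

-- phase-p match total read from a table
def mexpr (p : Nat) (cnt : (Int × Int × Int) × (Int × Int × Int) × (Int × Int × Int)) : Int :=
  get3 cnt.1 (p % 3) + get3 cnt.2.1 ((p + 1) % 3) + get3 cnt.2.2 ((p + 2) % 3)

lemma rgb_succ (p : Nat) :
    (if rgb p = "R" then "G" else if rgb p = "G" then "B" else "R") = rgb (p + 1) := by
  have h : p % 3 = 0 ∨ p % 3 = 1 ∨ p % 3 = 2 := by omega
  rcases h with h | h | h <;> simp [rgb, Nat.add_mod, h]

lemma foldA (l : List String) : ∀ (c : Int) (p : Nat) (prev : String),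
    (l.foldl fStep (c, rgb p, prev)).1 = c + misA p l := by
  induction l with
  | nil => intro c p prev; simp [misA]
  | cons x xs ih =>
    intro c p prev
    have hstep : fStep (c, rgb p, prev) x
        = ((if x ≠ rgb p then c + 1 else c), rgb (p + 1), rgb p) := by
      simp [fStep, rgb_succ]
    simp only [List.foldl_cons, hstep, ih, misA]
    by_cases h : x = rgb p <;> (simp [h]; try ring)

lemma mexpr_step (cnt : (Int × Int × Int) × (Int × Int × Int) × (Int × Int × Int))
    (i p : Nat) (x : String) :
    mexpr p (if x = "R" then upd3 cnt (i % 3) 0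
             else if x = "G" then upd3 cnt (i % 3) 1
             else if x = "B" then upd3 cnt (i % 3) 2
             else cnt)
      = mexpr p cnt + (if x = rgb (i + p) then 1 else 0) := by
  obtain ⟨⟨a1, a2, a3⟩, ⟨b1, b2, b3⟩, ⟨c1, c2, c3⟩⟩ := cnt
  have hi : i % 3 = 0 ∨ i % 3 = 1 ∨ i % 3 = 2 := by omega
  have hp : p % 3 = 0 ∨ p % 3 = 1 ∨ p % 3 = 2 := by omega
  by_cases hR : x = "R" <;> by_cases hG : x = "G" <;> by_cases hB : x = "B" <;>
    rcases hi with hi | hi | hi <;> rcases hp with hp | hp | hp <;>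
      simp [mexpr, upd3, bump, get3, rgb, Nat.add_mod, hi, hp, hR, hG, hB] <;> ring

lemma foldB (l : List String) :
    ∀ (i p : Nat) (cnt : (Int × Int × Int) × (Int × Int × Int) × (Int × Int × Int)),
    mexpr p (goB i cnt l) = mexpr p cnt + matA (i + p) l := by
  induction l with
  | nil => intro i p cnt; simp [goB, matA]
  | cons x xs ih =>
    intro i p cnt
    simp only [goB]
    rw [ih, mexpr_step, matA]
    have : i + 1 + p = (i + p) + 1 := by omega
    rw [this]; ring

lemma mis_add_mat (l : List String) : ∀ p : Nat, misA p l + matA p l = (l.length : Int) := by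
  induction l with
  | nil => intro p; simp [misA, matA]
  | cons x xs ih =>
    intro p
    simp only [misA, matA, List.length_cons]
    by_cases h : x = rgb p <;> (simp [h]; try rw [← ih (p + 1)]; try ring)

-- ===== VERDICT (by name: the statement is the Claim_ definition above) =====
theorem f_spec : Claim_equal_f := by
  intro l _
  unfold Spec_f f f_alt
  have hR : ("R" : String) = rgb 0 := by simp [rgb]
  have hG : ("G" : String) = rgb 1 := by simp [rgb]
  have hB : ("B" : String) = rgb 2 := by simp [rgb]
  have h1 := foldA l 0 0 "B"
  have h2 := foldA l 0 1 "R"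
  have h3 := foldA l 0 2 "G"
  rw [← hR] at h1; rw [← hG] at h2; rw [← hB] at h3
  have hb0 := foldB l 0 0 ((0, 0, 0), (0, 0, 0), (0, 0, 0))
  have hb1 := foldB l 0 1 ((0, 0, 0), (0, 0, 0), (0, 0, 0))
  have hb2 := foldB l 0 2 ((0, 0, 0), (0, 0, 0), (0, 0, 0))
  simp only [mexpr, Nat.zero_add] at hb0 hb1 hb2
  have z : ∀ k : Nat, get3 ((0 : Int), 0, 0) k = 0 := by
    intro k; by_cases h0 : k = 0 <;> by_cases h1 : k = 1 <;> simp [get3, h0, h1]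
  simp only [Nat.reduceAdd, Nat.reduceMod] at hb0 hb1 hb2 ⊢
  simp only [z, add_zero, zero_add] at hb0 hb1 hb2
  simp only [h1, h2, h3]
  have e0 := mis_add_mat l 0
  have e1 := mis_add_mat l 1
  have e2 := mis_add_mat l 2
  simp only [show (0:Int) + misA 0 l = misA 0 l from by ring,
             show (0:Int) + misA 1 l = misA 1 l from by ring,
             show (0:Int) + misA 2 l = misA 2 l from by ring]
  omega
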